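-- pv_equiv track=rewrite | github.com/faizanahemad/science-reader | agents/slide_agent.py | _create_fallback_storyboard
-- ===== SOURCE A (Python) =====
-- from typing import Dict, List, Union, Optional
--
-- def _create_fallback_storyboard(content: str, slide_count: Union[int, str]) -> List[tuple]:
--     """
--     Create a fallback storyboard when parsing fails.
--
--     Args:
--         content: Content to analyze
--         slide_count: Number of slides
--
--     Returns:
--         List of tuples for storyboard
--     """
--     numeric_count = slide_count if isinstance(slide_count, int) else 6
--
--     # Simple content-based storyboard
--     lines = content.strip().split('\n')
--     sections = []
--     current_section = []
--
--     for line in lines: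
--         line = line.strip()
--         if not line:
--             continue
--
--         if line.startswith('#') and current_section:
--             sections.append('\n'.join(current_section))
--             current_section = [line]
--         else:
--             current_section.append(line)
--
--     if current_section:
--         sections.append('\n'.join(current_section))
--
--     # Create storyboard from sections
--     storyboard = []
--     for i, section in enumerate(sections[:numeric_count]):
--         title = f"Slide {i+1}"
--         # Try to extract title from content
--         section_lines = section.split('\n')
--         for line in section_lines:
--             if line.startswith('#'):
--                 title = line.lstrip('#').strip()
--                 break
--
--         description = f"Cover content from section {i+1}"
--         storyboard.append((title, description))
--
--     # Fill remaining slides if needed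
--     while len(storyboard) < numeric_count:
--         storyboard.append((f"Additional Content {len(storyboard)+1}", "Additional information and details"))
--
--     return storyboard
-- ===== SOURCE B (Python) =====
-- def _create_fallback_storyboard(content, slide_count):
--     numeric_count = slide_count if isinstance(slide_count, int) else 6
--
--     # One pass: record, per section, its header title (or None).  A header line
--     # always begins a section; non-header lines only begin the very first one.
--     titles = []
--     for raw in content.strip().split('\n'):
--         line = raw.strip()
--         if line.startswith('#'):
--             titles.append(line.lstrip('#').strip())
--         elif line and not titles:
--             titles.append(None)
--
--     body = [(t if t is not None else f"Slide {i+1}", f"Cover content from section {i+1}")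
--             for i, t in enumerate(titles[:numeric_count])]
--     pad = [(f"Additional Content {j+1}", "Additional information and details")
--            for j in range(len(body), numeric_count)]
--     return body + pad
-- ===== Notes on version B (the rewrite author's own statement) =====
-- stated objective: alternative
-- what changed: B records each section's header title in a single pass over the stripped lines (a header line always begins a section), replacing A's build-joined-sections-then-re-split-and-rescan two-pass structure, and emits the padding slides arithmetically via range instead of a while-append loop.
import Mathlib
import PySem

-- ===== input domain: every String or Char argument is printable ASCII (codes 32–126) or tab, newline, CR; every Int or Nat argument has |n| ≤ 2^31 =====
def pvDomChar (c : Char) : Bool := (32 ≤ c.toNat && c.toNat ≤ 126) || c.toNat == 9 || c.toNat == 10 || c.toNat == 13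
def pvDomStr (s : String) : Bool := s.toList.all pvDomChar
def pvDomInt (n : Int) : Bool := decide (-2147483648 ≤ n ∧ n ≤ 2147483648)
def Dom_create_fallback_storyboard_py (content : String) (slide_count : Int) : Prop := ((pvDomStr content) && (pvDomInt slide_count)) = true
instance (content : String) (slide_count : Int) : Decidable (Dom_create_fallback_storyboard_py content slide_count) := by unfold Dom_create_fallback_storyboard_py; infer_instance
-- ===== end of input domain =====

-- B replaces A's two-pass build (join sections, then re-split each and scan for its
-- header) by a single pass that records each section's title directly; same values.

-- exact port of s.lstrip('#') (drop leading '#' characters)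
def pvLstripHash (s : String) : String := String.ofList (s.toList.dropWhile (· == '#'))

-- ===== PORT A =====
-- A's inner `for line in section_lines: if line.startswith('#'): …; break` scan
def pvFirstHeader : List String → Option String
  | [] => none
  | l :: rest => if PySem.Str.startswith l "#" then some l else pvFirstHeader rest

-- A's `while len(storyboard) < numeric_count: storyboard.append(…)`
def pvPadLoop (numeric_count : Int) (sb : List (String × String)) : List (String × String) :=
  if h : (sb.length : Int) < numeric_count then
    pvPadLoop numeric_count
      (sb ++ [("Additional Content " ++ PySem.Int.toStr ((sb.length : Int) + 1),
               "Additional information and details")])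
  else sb
termination_by (numeric_count - sb.length).toNat
decreasing_by simp only [List.length_append, List.length_cons, List.length_nil]; omega

def create_fallback_storyboard_py (content : String) (slide_count : Int) : List (String × String) :=
  let numeric_count := slide_count
  let lines := (PySem.Str.split? (PySem.Str.strip content) "\n").getD []
  let st := lines.foldl (fun (st : List String × List String) raw =>
      let line := PySem.Str.strip raw
      if line = "" then st
      else if PySem.Str.startswith line "#" ∧ st.2 ≠ [] then
        (st.1 ++ [PySem.Str.join "\n" st.2], [line])
      else (st.1, st.2 ++ [line])) ([], [])
  let sections := if st.2 = [] then st.1 else st.1 ++ [PySem.Str.join "\n" st.2]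
  let storyboard := (PySem.List.enumerate (PySem.List.slice sections none (some numeric_count))).foldl
      (fun sb p =>
        let title := match pvFirstHeader ((PySem.Str.split? p.2 "\n").getD []) with
          | some l => PySem.Str.strip (pvLstripHash l)
          | none => "Slide " ++ PySem.Int.toStr (p.1 + 1)
        sb ++ [(title, "Cover content from section " ++ PySem.Int.toStr (p.1 + 1))]) []
  pvPadLoop numeric_count storyboard

-- ===== PORT B =====
def create_fallback_storyboard_py_alt (content : String) (slide_count : Int) : List (String × String) :=
  let numeric_count := slide_count
  let titles := ((PySem.Str.split? (PySem.Str.strip content) "\n").getD []).foldl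
      (fun (titles : List (Option String)) raw =>
        let line := PySem.Str.strip raw
        if PySem.Str.startswith line "#" then
          titles ++ [some (PySem.Str.strip (pvLstripHash line))]
        else if line ≠ "" ∧ titles = [] then titles ++ [none]
        else titles) []
  let body := (PySem.List.enumerate (PySem.List.slice titles none (some numeric_count))).map
      (fun p => (p.2.getD ("Slide " ++ PySem.Int.toStr (p.1 + 1)),
                 "Cover content from section " ++ PySem.Int.toStr (p.1 + 1)))
  body ++ (PySem.List.pyRange (body.length : Int) numeric_count).map
      (fun j => ("Additional Content " ++ PySem.Int.toStr (j + 1),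
                 "Additional information and details"))

-- ===== PRECONDITION & SPEC =====
def Spec_create_fallback_storyboard_py (content : String) (slide_count : Int) (out : List (String × String)) : Prop := out = create_fallback_storyboard_py_alt content slide_count
instance (content : String) (slide_count : Int) (out : List (String × String)) : Decidable (Spec_create_fallback_storyboard_py content slide_count out) := by unfold Spec_create_fallback_storyboard_py; infer_instance

-- ===== CLAIM (what is proved, stated in full; the proofs are below) =====
def Claim_equal_create_fallback_storyboard_py : Prop := ∀ (content : String) (slide_count : Int), Dom_create_fallback_storyboard_py content slide_count → Spec_create_fallback_storyboard_py content slide_count (create_fallback_storyboard_py content slide_count)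

-- ===== LEMMAS AND PROOFS =====

-- split on a single '\n', structurally
def pvSplitNl : List Char → List (List Char)
  | [] => [[]]
  | a :: rest =>
    if a = '\n' then [] :: pvSplitNl rest
    else match pvSplitNl rest with
      | [] => [[a]]
      | p :: ps => (a :: p) :: ps

theorem pvSplitNl_no_nl (m : List Char) (h : '\n' ∉ m) : pvSplitNl m = [m] := by
  induction m with
  | nil => rfl
  | cons a rest ih =>
    simp only [List.mem_cons, not_or] at h
    rw [pvSplitNl, if_neg (by tauto), ih h.2]

theorem pvSplitNl_append (m rest : List Char) (h : '\n' ∉ m) :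
    pvSplitNl (m ++ '\n' :: rest) = m :: pvSplitNl rest := by
  induction m with
  | nil => simp [pvSplitNl]
  | cons a m ih =>
    simp only [List.mem_cons, not_or] at h
    rw [List.cons_append, pvSplitNl, if_neg (by tauto), ih h.2]

theorem pvSplitNl_nonnil (s : List Char) : pvSplitNl s ≠ [] := by
  induction s with
  | nil => simp [pvSplitNl]
  | cons a rest ih =>
    rw [pvSplitNl]
    split
    · simp
    · split
      · simp
      · simp

theorem pvSplitNl_pieces (s : List Char) : ∀ p ∈ pvSplitNl s, '\n' ∉ p := by
  induction s with
  | nil => simp [pvSplitNl]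
  | cons a rest ih =>
    rw [pvSplitNl]
    split
    · intro p hp
      rcases List.mem_cons.mp hp with h | h
      · simp [h]
      · exact ih p h
    · rename_i ha
      cases hrec : pvSplitNl rest with
      | nil => exact absurd hrec (pvSplitNl_nonnil rest)
      | cons q qs =>
        simp only [hrec]
        intro p hp
        rcases List.mem_cons.mp hp with h | h
        · subst h
          have := ih q (by simp [hrec])
          simp only [List.mem_cons, not_or]
          exact ⟨Ne.symm ha, this⟩
        · exact ih p (by simp [hrec, h])

theorem pvGo_nil (sep : List Char) (f : Nat) (cur : List Char) (acc : List (List Char)) :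
    PySem.Chars.splitOn.go sep (f+1) [] cur acc = (cur.reverse :: acc).reverse := rfl

theorem pvGo_cons (sep : List Char) (f : Nat) (c : Char) (rest cur : List Char) (acc : List (List Char)) :
    PySem.Chars.splitOn.go sep (f+1) (c :: rest) cur acc =
      if sep.isPrefixOf (c :: rest) then
        PySem.Chars.splitOn.go sep f (List.drop sep.length (c :: rest)) [] (cur.reverse :: acc)
      else PySem.Chars.splitOn.go sep f rest (c :: cur) acc := rfl

theorem pvGo_eq (l : List Char) : ∀ (fuel : Nat) (cur : List Char) (acc : List (List Char)),
    l.length < fuel → '\n' ∉ cur →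
    PySem.Chars.splitOn.go ['\n'] fuel l cur acc = acc.reverse ++ pvSplitNl (cur.reverse ++ l) := by
  induction l with
  | nil =>
    intro fuel cur acc hf hc
    cases fuel with
    | zero => omega
    | succ f =>
      rw [pvGo_nil, pvSplitNl_no_nl _ (by simpa using hc)]
      simp
  | cons a rest ih =>
    intro fuel cur acc hf hc
    cases fuel with
    | zero => omega
    | succ f =>
      rw [pvGo_cons]
      simp only [List.length_cons] at hf
      by_cases ha : a = '\n'
      · subst ha
        rw [if_pos (by simp [List.isPrefixOf])]
        simp only [List.length_cons, List.length_nil, List.drop_succ_cons, List.drop_zero]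
        rw [ih f [] (cur.reverse :: acc) (by omega) (by simp)]
        rw [pvSplitNl_append _ _ (by simpa using hc)]
        simp
      · rw [if_neg (by simp [List.isPrefixOf, Ne.symm ha])]
        rw [ih f (a :: cur) acc (by omega) (by simp [hc, Ne.symm ha])]
        simp

theorem pvSplitOn_eq (s : List Char) : PySem.Chars.splitOn s ['\n'] = pvSplitNl s := by
  rw [PySem.Chars.splitOn, pvGo_eq s (s.length + 1) [] [] (by omega) (by simp)]
  simp

theorem pvSplit?_eq (s : String) :
    ((PySem.Str.split? s "\n").getD []).map String.toList = pvSplitNl s.toList := by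
  have h := PySem.Str.split?_map s "\n"
  rw [PySem.Chars.split?] at h
  have hsep : ("\n" : String).toList = ['\n'] := rfl
  rw [hsep, if_neg (by simp), pvSplitOn_eq] at h
  cases hs : PySem.Str.split? s "\n" with
  | none => rw [hs] at h; simp at h
  | some l =>
    rw [hs] at h
    simpa using h

theorem pvStripChars_no_nl (m : List Char) (h : '\n' ∉ m) : '\n' ∉ PySem.Chars.strip m := by
  simp only [PySem.Chars.strip, PySem.Chars.rstrip, PySem.Chars.lstrip]
  intro hm
  apply h
  have h1 := List.dropWhile_sublist (l := m) (p := PySem.Chars.isspace)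
  have h2 := List.dropWhile_sublist (l := (List.dropWhile PySem.Chars.isspace m).reverse)
    (p := PySem.Chars.isspace)
  have := (h2.reverse).subset (by simpa using hm)
  exact h1.subset (by simpa using this)

theorem pvStrip_no_nl (s : String) (h : '\n' ∉ s.toList) : '\n' ∉ (PySem.Str.strip s).toList := by
  rw [PySem.Str.toList_strip]; exact pvStripChars_no_nl _ h

theorem pvLines_no_nl (s : String) :
    ∀ raw ∈ (PySem.Str.split? s "\n").getD [], '\n' ∉ raw.toList := by
  intro raw hraw
  have := pvSplit?_eq s
  have hmem : raw.toList ∈ pvSplitNl s.toList := by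
    rw [← this]; exact List.mem_map_of_mem hraw
  exact pvSplitNl_pieces _ _ hmem

-- the title A's end-of-pass scan extracts from a rebuilt section string
def pvSecTitle (sec : String) : Option String :=
  (pvFirstHeader ((PySem.Str.split? sec "\n").getD [])).map
    (fun l => PySem.Str.strip (pvLstripHash l))

-- the same title, read off the still-unjoined list of lines
def pvCurT (cur : List String) : Option String :=
  (pvFirstHeader cur).map (fun l => PySem.Str.strip (pvLstripHash l))

theorem pvSplitNl_intercalate (parts : List (List Char)) (hne : parts ≠ [])
    (h : ∀ p ∈ parts, '\n' ∉ p) : pvSplitNl (List.intercalate ['\n'] parts) = parts := by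
  induction parts with
  | nil => exact absurd rfl hne
  | cons x xs ih =>
    cases xs with
    | nil =>
      simp only [List.intercalate]
      simpa using pvSplitNl_no_nl x (h x (by simp))
    | cons y ys =>
      have hx : '\n' ∉ x := h x (by simp)
      have hstep : List.intercalate ['\n'] (x :: y :: ys) =
          x ++ ['\n'] ++ List.intercalate ['\n'] (y :: ys) := by
        simp [List.intercalate]
      rw [hstep, List.append_assoc, List.singleton_append, pvSplitNl_append _ _ hx,
        ih (by simp) (fun p hp => h p (by simp [hp]))]

theorem pvMapToList_inj (xs ys : List String) (h : xs.map String.toList = ys.map String.toList) :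
    xs = ys := by
  have hinj : Function.Injective String.toList := fun a b hab => String.toList_inj.mp hab
  exact (List.map_injective_iff.mpr hinj) h

theorem pvJoinSplit (cur : List String) (hne : cur ≠ []) (h : ∀ l ∈ cur, '\n' ∉ l.toList) :
    (PySem.Str.split? (PySem.Str.join "\n" cur) "\n").getD [] = cur := by
  apply pvMapToList_inj
  rw [pvSplit?_eq, PySem.Str.toList_join]
  have hsep : ("\n" : String).toList = ['\n'] := rfl
  rw [hsep, PySem.Chars.join]
  exact pvSplitNl_intercalate _ (by simpa using hne)
    (by intro p hp; obtain ⟨l, hl, rfl⟩ := List.mem_map.mp hp; exact h l hl)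

theorem pvSecTitle_join (cur : List String) (hne : cur ≠ []) (h : ∀ l ∈ cur, '\n' ∉ l.toList) :
    pvSecTitle (PySem.Str.join "\n" cur) = pvCurT cur := by
  rw [pvSecTitle, pvJoinSplit cur hne h]; rfl

theorem pvFirstHeader_append_nohdr (xs : List String) (l : String)
    (h : ¬ PySem.Str.startswith l "#") : pvFirstHeader (xs ++ [l]) = pvFirstHeader xs := by
  induction xs with
  | nil =>
    simp only [List.nil_append, pvFirstHeader]
    rw [if_neg h]
  | cons x xs ih =>
    rw [List.cons_append, pvFirstHeader, pvFirstHeader]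
    split <;> simp [ih]

theorem pvSliceMap {α β : Type} (f : α → β) (xs : List α) (b : Option Int) :
    PySem.List.slice (xs.map f) none b = (PySem.List.slice xs none b).map f := by
  simp [PySem.List.slice, List.map_take, List.map_drop]

theorem pvEnumMap {α β : Type} (f : α → β) (xs : List α) (s : Int) :
    PySem.List.enumerate (xs.map f) s = (PySem.List.enumerate xs s).map (fun p => (p.1, f p.2)) := by
  induction xs generalizing s with
  | nil => simp [PySem.List.enumerate_nil]
  | cons x xs ih => simp [PySem.List.enumerate_cons, ih]

theorem pvFoldlMap {α β : Type} (g : α → β) (l : List α) :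
    List.foldl (fun acc x => acc ++ [g x]) [] l = l.map g := by
  rw [PySem.List.foldl_append_eq_flatMap (fun x => [g x]) l []]
  induction l with
  | nil => rfl
  | cons a l ih => simp_all

theorem pvPadLoop_eq (nc : Int) (sb : List (String × String)) :
    pvPadLoop nc sb = sb ++ (PySem.List.pyRange (sb.length : Int) nc).map
      (fun j => ("Additional Content " ++ PySem.Int.toStr (j + 1),
                 "Additional information and details")) := by
  fun_induction pvPadLoop nc sb with
  | case1 sb h ih =>
    rw [ih, PySem.List.pyRange_one_cons h]
    simp [List.append_assoc]
  | case2 sb h =>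
    rw [PySem.List.pyRange_one_eq_nil (by omega)]
    simp

theorem pvCurT_single_hdr (line : String) (h : PySem.Str.startswith line "#" = true) :
    pvCurT [line] = some (PySem.Str.strip (pvLstripHash line)) := by
  rw [pvCurT, pvFirstHeader, if_pos h]; rfl

theorem pvCurT_single_nohdr (line : String) (h : ¬ PySem.Str.startswith line "#" = true) :
    pvCurT [line] = none := by
  rw [pvCurT, pvFirstHeader, if_neg h, pvFirstHeader]; rfl

def pvFinal (st : List String × List String) : List String :=
  if st.2 = [] then st.1 else st.1 ++ [PySem.Str.join "\n" st.2]

theorem pvFold_inv (lines : List String) :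
    ∀ (sections current : List String) (titles : List (Option String)),
    (∀ raw ∈ lines, '\n' ∉ raw.toList) →
    (current = [] → sections = []) →
    (∀ l ∈ current, '\n' ∉ l.toList) →
    titles = sections.map pvSecTitle ++ (if current = [] then [] else [pvCurT current]) →
    List.foldl (fun (titles : List (Option String)) raw =>
        let line := PySem.Str.strip raw
        if PySem.Str.startswith line "#" then
          titles ++ [some (PySem.Str.strip (pvLstripHash line))]
        else if line ≠ "" ∧ titles = [] then titles ++ [none]
        else titles) titles lines =
      (pvFinal
        (List.foldl (fun (st : List String × List String) raw =>
          let line := PySem.Str.strip raw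
          if line = "" then st
          else if PySem.Str.startswith line "#" ∧ st.2 ≠ [] then
            (st.1 ++ [PySem.Str.join "\n" st.2], [line])
          else (st.1, st.2 ++ [line])) (sections, current) lines)).map pvSecTitle := by
  induction lines with
  | nil =>
    intro sections current titles _ himp hwf htit
    simp only [List.foldl_nil]
    by_cases h2 : current = []
    · rw [htit, if_pos h2, himp h2, h2]
      simp [pvFinal]
    · have hfin : pvFinal (sections, current) = sections ++ [PySem.Str.join "\n" current] := by
        simp [pvFinal, h2]
      rw [htit, if_neg h2, hfin, List.map_append, List.map_singleton,
        pvSecTitle_join current h2 hwf]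
  | cons raw rest ih =>
    intro sections current titles hl himp hwf htit
    have hraw : '\n' ∉ raw.toList := hl raw (by simp)
    have hline : '\n' ∉ (PySem.Str.strip raw).toList := pvStrip_no_nl raw hraw
    have hrest : ∀ r ∈ rest, '\n' ∉ r.toList := fun r hr => hl r (by simp [hr])
    have hext : ∀ (cur : List String), (∀ l ∈ cur, '\n' ∉ l.toList) →
        ∀ l ∈ cur ++ [PySem.Str.strip raw], '\n' ∉ l.toList := by
      intro cur hcur l hm
      rcases List.mem_append.mp hm with h | h
      · exact hcur l h
      · simp only [List.mem_singleton] at h; subst h; exact hline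
    simp only [List.foldl_cons]
    split_ifs with h1 h2 h3 h4 h5 h6 h7 h8
    · -- header line that A sees as empty: impossible
      rw [h2] at h1; exact absurd h1 (by decide)
    · -- header, current ≠ []: A flushes, B appends the new section's title
      refine ih _ [PySem.Str.strip raw] _ hrest (by simp) (hext [] (by simp)) ?_
      rw [htit, if_neg h3.2, if_neg (by simp)]
      rw [List.map_append, List.map_singleton, pvSecTitle_join current h3.2 hwf]
      simp [pvCurT_single_hdr _ h1]
    · -- header as very first content line: A appends it to the empty current
      have hcur : current = [] := by by_contra hcc; exact h3 ⟨h1, hcc⟩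
      have hsec : sections = [] := himp hcur
      refine ih sections (current ++ [PySem.Str.strip raw]) _ hrest (by simp [hcur]) (hext current hwf) ?_
      rw [htit, hcur, hsec, if_pos rfl, if_neg (by simp)]
      simp [pvCurT_single_hdr _ h1]
    · -- B would record an untitled section while A sees an empty line: impossible
      exact absurd h5 (fun h => h4.1 h)
    · -- A flushes on a non-header line: impossible
      exact absurd h6.1 h1
    · -- plain first content line: B records an untitled section, A starts current
      have hcur : current = [] := by
        by_contra hcc
        have : titles ≠ [] := by rw [htit, if_neg hcc]; simp
        exact this h4.2
      have hsec : sections = [] := himp hcur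
      refine ih sections (current ++ [PySem.Str.strip raw]) _ hrest (by simp [hcur]) (hext current hwf) ?_
      rw [htit, hcur, hsec, if_pos rfl, if_neg (by simp)]
      simp [pvCurT_single_nohdr _ h1]
    · -- empty line: both sides skip it
      exact ih sections current titles hrest himp hwf htit
    · -- A flushes on a non-header line: impossible
      exact absurd h8.1 h1
    · -- plain later line: A extends current, B keeps its titles
      have hcur : current ≠ [] := by
        intro hc
        exact h4 ⟨h7, by rw [htit, hc, himp hc]; simp⟩
      refine ih sections (current ++ [PySem.Str.strip raw]) titles hrest (by simp) (hext current hwf) ?_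
      rw [htit, if_neg hcur, if_neg (by simp)]
      congr 2
      rw [pvCurT, pvCurT, pvFirstHeader_append_nohdr current _ (by simpa using h1)]

theorem pvAssemble (sections : List String) (nc : Int) :
    pvPadLoop nc ((PySem.List.enumerate (PySem.List.slice sections none (some nc))).foldl
      (fun sb p => sb ++
        [(match pvFirstHeader ((PySem.Str.split? p.2 "\n").getD []) with
            | some l => PySem.Str.strip (pvLstripHash l)
            | none => "Slide " ++ PySem.Int.toStr (p.1 + 1),
          "Cover content from section " ++ PySem.Int.toStr (p.1 + 1))]) []) =
    ((PySem.List.enumerate (PySem.List.slice (sections.map pvSecTitle) none (some nc))).map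
        (fun p => (p.2.getD ("Slide " ++ PySem.Int.toStr (p.1 + 1)),
                   "Cover content from section " ++ PySem.Int.toStr (p.1 + 1)))) ++
      (PySem.List.pyRange (((PySem.List.enumerate (PySem.List.slice (sections.map pvSecTitle) none (some nc))).map
        (fun p => (p.2.getD ("Slide " ++ PySem.Int.toStr (p.1 + 1)),
                   "Cover content from section " ++ PySem.Int.toStr (p.1 + 1)))).length : Int) nc).map
        (fun j => ("Additional Content " ++ PySem.Int.toStr (j + 1),
                   "Additional information and details")) := by
  rw [pvSliceMap, pvEnumMap, List.map_map, pvFoldlMap]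
  have hfun : ∀ p : Int × String,
      ((match pvFirstHeader ((PySem.Str.split? p.2 "\n").getD []) with
          | some l => PySem.Str.strip (pvLstripHash l)
          | none => "Slide " ++ PySem.Int.toStr (p.1 + 1)),
        "Cover content from section " ++ PySem.Int.toStr (p.1 + 1)) =
      ((pvSecTitle p.2).getD ("Slide " ++ PySem.Int.toStr (p.1 + 1)),
        "Cover content from section " ++ PySem.Int.toStr (p.1 + 1)) := by
    intro p
    rw [pvSecTitle]
    cases pvFirstHeader ((PySem.Str.split? p.2 "\n").getD []) <;> rfl
  rw [List.map_congr_left (fun p _ => hfun p), pvPadLoop_eq]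
  rfl

-- ===== VERDICT (by name: the statement is the Claim_ definition above) =====
theorem create_fallback_storyboard_py_spec : Claim_equal_create_fallback_storyboard_py := by
  unfold Claim_equal_create_fallback_storyboard_py
  intro content slide_count _
  unfold Spec_create_fallback_storyboard_py
  simp only [create_fallback_storyboard_py, create_fallback_storyboard_py_alt]
  have hfold : List.foldl
      (fun (titles : List (Option String)) raw =>
        if PySem.Str.startswith (PySem.Str.strip raw) "#" = true then
          titles ++ [some (PySem.Str.strip (pvLstripHash (PySem.Str.strip raw)))]
        else if PySem.Str.strip raw ≠ "" ∧ titles = [] then titles ++ [none]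
        else titles) [] ((PySem.Str.split? (PySem.Str.strip content) "\n").getD []) =
      (pvFinal (List.foldl
        (fun (st : List String × List String) raw =>
          if PySem.Str.strip raw = "" then st
          else if PySem.Str.startswith (PySem.Str.strip raw) "#" = true ∧ st.2 ≠ [] then
            (st.1 ++ [PySem.Str.join "\n" st.2], [PySem.Str.strip raw])
          else (st.1, st.2 ++ [PySem.Str.strip raw])) ([], [])
        ((PySem.Str.split? (PySem.Str.strip content) "\n").getD []))).map pvSecTitle :=
    pvFold_inv ((PySem.Str.split? (PySem.Str.strip content) "\n").getD [])
      [] [] [] (pvLines_no_nl _) (fun _ => rfl) (by simp) (by simp)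
  rw [hfold, ← pvAssemble]
  rfl
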